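-- pv_equiv track=rewrite | github.com/PierpaoloSpadafora/Fondamenti_di_Programmazione-1 | Domjudge/Prove D'Esame/E3.py | findseq
-- ===== SOURCE A (Python) =====
-- def findseq(mat,c):
--     if((len(mat))<2):
--         return c
--     elif(len(mat)==2):
--         if(mat[0]+1==mat[1]):
--             return c+1
--         else:
--             return c
--     else:
--         seq=[]
--         inseq=False
--         for i in range(len(mat)-1):
--             if((mat[i+1]-1)==mat[i]):
--                 seq.append(mat[i])
--                 inseq=True
--             else:
--                 if(inseq):
--                     seq.append(mat[i])
--                     c+=1
--                 break
--         return(findseq(mat[i+1:],c))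
-- ===== SOURCE B (Python) =====
-- def findseq(mat, c):
--     # single linear pass: count maximal runs of consecutive (+1) elements of length >= 2
--     run = 1
--     for prev, cur in zip(mat, mat[1:]):
--         if cur == prev + 1:
--             run += 1
--         else:
--             if run >= 2:
--                 c += 1
--             run = 1
--     if run >= 2:
--         c += 1
--     return c
-- ===== Notes on version B (the rewrite author's own statement) =====
-- stated objective: faster
-- what changed: Replaced A's recursive tail-slicing (re-slicing the list after every run and restarting an index loop) by one linear scan over adjacent pairs keeping a (run-length, count) state.
-- intended difference: On lists whose last three elements are consecutive (trailing +1-run of length >= 3) A's loop runs off the end without counting that run and returns one less; B counts it, which is the intended run count (A itself counts a trailing run of length exactly 2). — e.g. on findseq([0, 1, 2], 0): A returns 0, B returns 1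
import Mathlib
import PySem

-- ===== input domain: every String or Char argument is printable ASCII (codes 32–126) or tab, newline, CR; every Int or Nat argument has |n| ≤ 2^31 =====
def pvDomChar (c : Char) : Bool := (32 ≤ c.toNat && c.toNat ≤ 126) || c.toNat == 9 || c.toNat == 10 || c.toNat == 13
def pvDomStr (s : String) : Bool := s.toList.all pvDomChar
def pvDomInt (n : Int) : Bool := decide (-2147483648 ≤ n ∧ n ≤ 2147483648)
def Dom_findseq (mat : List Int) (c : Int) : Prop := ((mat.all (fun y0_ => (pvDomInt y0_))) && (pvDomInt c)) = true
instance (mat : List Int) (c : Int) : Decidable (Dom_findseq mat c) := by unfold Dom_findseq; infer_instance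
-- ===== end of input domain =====

-- B replaces A's recursive tail-slicing with one linear scan over adjacent pairs (asymptotically
-- faster); on lists whose last three elements are consecutive A drops the trailing run (returns one
-- less) and B returns the intended count — stated as D_findseq below.


-- ===== PORT A =====
-- A's for-loop over i in range(len(mat)-1) with break, walking the adjacent pairs
-- (mat[i], mat[i+1]); state = (remaining suffix mat[i+1:], seq, c); returns at the break
-- (or after the last pair, where mat[i+1:] is the final singleton).
def findseqLoop : List Int → List Int → Bool → Int → List Int × List Int × Int
  | a :: b :: t, seq, inseq, c =>
    if b - 1 = a then findseqLoop (b :: t) (seq ++ [a]) true c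
    else if inseq then (b :: t, seq ++ [a], c + 1) else (b :: t, seq, c)
  | rest, seq, _, c => (rest, seq, c)

-- termination lemma for findseq (cited by its decreasing_by)
theorem findseqLoop_shrink (mat : List Int) : ∀ (seq : List Int) (inseq : Bool) (c : Int),
    2 ≤ mat.length → (findseqLoop mat seq inseq c).1.length < mat.length := by
  induction mat with
  | nil => intro _ _ _ h; simp at h
  | cons a t ih =>
    intro seq inseq c h
    cases t with
    | nil => simp at h
    | cons b t2 =>
      rw [findseqLoop]
      split
      · cases t2 with
        | nil => simp [findseqLoop]
        | cons x t3 =>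
          have := ih (seq ++ [a]) true c (by simp)
          simp only [List.length_cons] at this ⊢
          omega
      · split <;> simp

def findseq (mat : List Int) (c : Int) : Int :=
  if mat.length < 2 then c
  else if mat.length = 2 then
    if mat.getD 0 0 + 1 = mat.getD 1 0 then c + 1 else c
  else
    let p := findseqLoop mat [] false c
    findseq p.1 p.2.2
termination_by mat.length
decreasing_by exact findseqLoop_shrink mat [] false c (by omega)

-- ===== PORT B =====
-- one step of B's scan: state (run, c), pair (prev, cur)
def altStep (st : Int × Int) (pc : Int × Int) : Int × Int :=
  if pc.2 = pc.1 + 1 then (st.1 + 1, st.2)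
  else (1, if 2 ≤ st.1 then st.2 + 1 else st.2)

def findseq_alt (mat : List Int) (c : Int) : Int :=
  let st := (mat.zip mat.tail).foldl altStep (1, c)
  if 2 ≤ st.1 then st.2 + 1 else st.2

-- ===== PRECONDITION & SPEC =====
-- helper for D_: the last three elements of the list are consecutive (+1 each)
def lastThreeConsec : List Int → Bool
  | [a, b, c3] => decide (b = a + 1 ∧ c3 = b + 1)
  | _ :: b :: c :: t => lastThreeConsec (b :: c :: t)
  | _ => false

-- On lists whose last three elements are consecutive (trailing +1-run of length ≥ 3) A's loop runs
-- off the end without counting that run and returns one less than the run count; B counts it,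
-- which is the intended value (A itself counts a trailing run of length exactly 2).
def D_findseq (mat : List Int) (c : Int) : Prop := lastThreeConsec mat = true
instance (mat : List Int) (c : Int) : Decidable (D_findseq mat c) := by unfold D_findseq; infer_instance

def Spec_findseq (mat : List Int) (c : Int) (out : Int) : Prop := ¬ D_findseq mat c → out = findseq_alt mat c
instance (mat : List Int) (c : Int) (out : Int) : Decidable (Spec_findseq mat c out) := by unfold Spec_findseq; infer_instance

def pvDiffWitness_findseq : List Int × Int := ([0, 1, 2], 0)
def pvDiffWitnessOut_findseq : Int × Int := (0, 1)

-- ===== CLAIM (what is proved, stated in full; the proofs are below) =====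
def Claim_unchanged_findseq : Prop := ∀ (mat : List Int) (c : Int), Dom_findseq mat c → Spec_findseq mat c (findseq mat c)
def Claim_changed_findseq : Prop := Dom_findseq (pvDiffWitness_findseq.1) (pvDiffWitness_findseq.2) ∧ D_findseq (pvDiffWitness_findseq.1) (pvDiffWitness_findseq.2) ∧ findseq (pvDiffWitness_findseq.1) (pvDiffWitness_findseq.2) = pvDiffWitnessOut_findseq.1 ∧ findseq_alt (pvDiffWitness_findseq.1) (pvDiffWitness_findseq.2) = pvDiffWitnessOut_findseq.2 ∧ pvDiffWitnessOut_findseq.1 ≠ pvDiffWitnessOut_findseq.2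
def Claim_exact_findseq : Prop := ∀ (mat : List Int) (c : Int), Dom_findseq mat c → D_findseq mat c → findseq mat c ≠ findseq_alt mat c

-- ===== LEMMAS AND PROOFS =====

-- reference count of maximal +1-runs of length ≥ 2 (flag: currently inside a run)
def R : List Int → Bool → Int
  | a :: b :: t, inRun => if b = a + 1 then R (b :: t) true else (if inRun then 1 else 0) + R (b :: t) false
  | _, inRun => if inRun then 1 else 0

-- all adjacent pairs consecutive
def chain : List Int → Bool
  | a :: b :: t => decide (b = a + 1) && chain (b :: t)
  | _ => true

def flush (st : Int × Int) : Int := if 2 ≤ st.1 then st.2 + 1 else st.2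
def foldB (l : List (Int × Int)) (st : Int × Int) : Int := flush (l.foldl altStep st)

theorem foldB_char (t : List Int) : ∀ (a : Int) (r c : Int), 1 ≤ r →
    foldB ((a :: t).zip t) (r, c) = c + R (a :: t) (decide (2 ≤ r)) := by
  induction t with
  | nil => intro a r c hr; by_cases h : 2 ≤ r <;> simp [foldB, flush, R, h]
  | cons b t' ih =>
    intro a r c hr
    simp only [List.zip_cons_cons, foldB, List.foldl_cons]
    by_cases hb : b = a + 1
    · have hstep : altStep (r, c) (a, b) = (r + 1, c) := by simp [altStep, hb]
      rw [hstep]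
      have hrec := ih b (r + 1) c (by omega)
      simp only [foldB] at hrec
      rw [hrec]
      have h2 : decide (2 ≤ r + 1) = true := by simp; omega
      rw [h2, show R (a :: b :: t') (decide (2 ≤ r)) = R (b :: t') true from by
        rw [R, if_pos hb]]
    · have hstep : altStep (r, c) (a, b) = (1, if 2 ≤ r then c + 1 else c) := by
        simp [altStep, hb]
      rw [hstep]
      have hrec := ih b 1 (if 2 ≤ r then c + 1 else c) (by omega)
      simp only [foldB] at hrec
      rw [hrec, show R (a :: b :: t') (decide (2 ≤ r)) =
          (if decide (2 ≤ r) then (1 : Int) else 0) + R (b :: t') false from by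
        rw [R, if_neg hb]]
      by_cases h : 2 ≤ r <;> simp [h]
      ring

theorem alt_char (mat : List Int) (c : Int) : findseq_alt mat c = c + R mat false := by
  cases mat with
  | nil => simp [findseq_alt, R]
  | cons a t =>
    have := foldB_char t a 1 c (by omega)
    simp only [foldB] at this
    simpa [findseq_alt, show decide (2 ≤ (1:Int)) = false from by decide] using this

theorem chain_L3C : ∀ (mat : List Int), chain mat = true → 3 ≤ mat.length → lastThreeConsec mat = true
  | [] => by intro _ h; simp at h
  | [_] => by intro _ h; simp at h
  | [_, _] => by intro _ h; simp at h
  | a :: b :: c2 :: t => by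
    cases t with
    | nil =>
      intro h _
      simp only [chain, Bool.and_eq_true, decide_eq_true_eq] at h
      simp only [lastThreeConsec, decide_eq_true_eq]
      tauto
    | cons x t2 =>
      intro h hl
      rw [chain, Bool.and_eq_true] at h
      have := chain_L3C (b :: c2 :: x :: t2) h.2 (by simp)
      simpa [lastThreeConsec] using this

theorem loop_char : ∀ (mat seq : List Int) (inseq : Bool) (c : Int), 2 ≤ mat.length →
    (chain mat = true ∧ (findseqLoop mat seq inseq c).1.length = 1 ∧
      (findseqLoop mat seq inseq c).2.2 = c ∧ R mat inseq = 1)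
  ∨ (chain mat = false ∧
      (findseqLoop mat seq inseq c).2.2 - c + R (findseqLoop mat seq inseq c).1 false = R mat inseq ∧
      (findseqLoop mat seq inseq c).1.length < mat.length ∧
      1 ≤ (findseqLoop mat seq inseq c).1.length ∧
      lastThreeConsec (findseqLoop mat seq inseq c).1 = lastThreeConsec mat) := by
  intro mat
  induction mat with
  | nil => intro _ _ _ h; simp at h
  | cons a t ih =>
    intro seq inseq c h
    cases t with
    | nil => simp at h
    | cons b t2 =>
      by_cases hb : b - 1 = a
      · have hba : b = a + 1 := by omega
        rw [findseqLoop, if_pos hb]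
        cases t2 with
        | nil =>
          left
          refine ⟨by rw [chain, hba]; simp [chain], by rfl, by rfl, ?_⟩
          rw [R, if_pos hba, show R [b] true = (1:Int) from rfl]
        | cons x t3 =>
          rcases ih (seq ++ [a]) true c (by simp) with ⟨h1, h2, h3, h4⟩ | ⟨h1, h2, h3, h4, h5⟩
          · left
            refine ⟨by rw [chain, h1, hba]; simp, h2, h3, ?_⟩
            rw [R, if_pos hba]; exact h4
          · right
            refine ⟨by rw [chain, h1]; simp, ?_,
              by simp only [List.length_cons] at h3 ⊢; omega, h4, ?_⟩
            · rw [R, if_pos hba]; exact h2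
            · rw [h5]
              cases t3 with
              | nil =>
                have hx : ¬ x = b + 1 := by
                  simp [chain] at h1; exact h1
                simp [lastThreeConsec, hx]
              | cons y t4 => simp [lastThreeConsec]
      · have hba : ¬ (b = a + 1) := by omega
        rw [findseqLoop, if_neg hb]
        right
        have hres : (if inseq then ((b :: t2), seq ++ [a], c + 1) else ((b :: t2), seq, c)) =
            ((b :: t2), (if inseq then seq ++ [a] else seq), c + (if inseq then 1 else 0)) := by
          cases inseq <;> simp
        rw [hres]
        refine ⟨by rw [chain]; simp [hba], ?_, by simp, by simp, ?_⟩
        · rw [R, if_neg hba]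
          cases inseq <;> simp [add_comm]
        · cases t2 with
          | nil => simp [lastThreeConsec]
          | cons x t3 =>
            cases t3 with
            | nil => simp [lastThreeConsec, hba]
            | cons y t4 => simp [lastThreeConsec]

theorem A_char (mat : List Int) (c : Int) :
    findseq mat c = c + R mat false - (if lastThreeConsec mat = true then 1 else 0) := by
  rw [findseq]
  split
  · -- length < 2
    rename_i hlt
    match mat, hlt with
    | [], _ => simp [R, lastThreeConsec]
    | [a], _ => simp [R, lastThreeConsec]
  · split
    · -- length = 2
      rename_i hlt hl2
      match mat, hl2 with
      | [a, b], _ =>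
        rw [show [a, b].getD 0 0 = a from rfl, show [a, b].getD 1 0 = b from rfl,
          show lastThreeConsec [a, b] = false from rfl, R]
        by_cases h : b = a + 1
        · rw [if_pos (by omega : a + 1 = b), if_pos h,
            show R [b] true = (1:Int) from rfl]; simp
        · rw [if_neg (by omega : ¬ a + 1 = b), if_neg h,
            show R [b] false = (0:Int) from rfl]; simp
    · -- length ≥ 3
      rename_i hlt hl2
      have h3 : 3 ≤ mat.length := by omega
      rcases loop_char mat [] false c (by omega) with ⟨hch, hlen, hc, hR⟩ | ⟨hch, hsum, hlt', hge, hl3⟩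
      · have hL3 : lastThreeConsec mat = true := chain_L3C mat hch h3
        have hbase : findseq (findseqLoop mat [] false c).1 (findseqLoop mat [] false c).2.2
            = (findseqLoop mat [] false c).2.2 := by
          rw [findseq]; rw [if_pos (by omega)]
        rw [hbase, hc, hR, hL3]
        simp
      · have ih := A_char (findseqLoop mat [] false c).1 (findseqLoop mat [] false c).2.2
        rw [ih, hl3]
        omega
termination_by mat.length
decreasing_by exact hlt'

-- ===== VERDICT (by name: the statement is the Claim_ definition above) =====
theorem findseq_spec : Claim_unchanged_findseq := by
  intro mat c _ hD
  unfold D_findseq at hD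
  rw [A_char, alt_char]
  simp [hD]

theorem findseq_changed : Claim_changed_findseq := by
  unfold Claim_changed_findseq
  refine ⟨by decide, by decide, ?_, by decide, by decide⟩
  rw [A_char]; decide

theorem findseq_tight : Claim_exact_findseq := by
  intro mat c _ hD
  unfold D_findseq at hD
  rw [A_char, alt_char, if_pos hD]
  omega
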